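-- pv_equiv track=rewrite | github.com/pdxgx/neoepiscope | vcfParser.py | make_mute_seq
-- ===== SOURCE A (Python) =====
-- def make_mute_seq(orig_seq, mute_locs):
--     mute_seq = ""
--     for ind in range(len(orig_seq)):
--         if ind in mute_locs:
--             mute_seq += mute_locs[ind]
--         else:
--             mute_seq += orig_seq[ind]
--     return mute_seq
-- ===== SOURCE B (Python) =====
-- def make_mute_seq(orig_seq, mute_locs):
--     buf = list(orig_seq)
--     for k, v in mute_locs.items():
--         if 0 <= k < len(buf):
--             buf[k] = v
--     return ''.join(buf)
-- ===== Notes on version B (the rewrite author's own statement) =====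
-- stated objective: alternative
-- what changed: Instead of scanning every index and doing a dict membership test plus lookup per position while growing a string, B copies the sequence into a list buffer once, patches only the dict's own entries (ignoring keys outside the index range, as A's membership test does), and joins.
import Mathlib
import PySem

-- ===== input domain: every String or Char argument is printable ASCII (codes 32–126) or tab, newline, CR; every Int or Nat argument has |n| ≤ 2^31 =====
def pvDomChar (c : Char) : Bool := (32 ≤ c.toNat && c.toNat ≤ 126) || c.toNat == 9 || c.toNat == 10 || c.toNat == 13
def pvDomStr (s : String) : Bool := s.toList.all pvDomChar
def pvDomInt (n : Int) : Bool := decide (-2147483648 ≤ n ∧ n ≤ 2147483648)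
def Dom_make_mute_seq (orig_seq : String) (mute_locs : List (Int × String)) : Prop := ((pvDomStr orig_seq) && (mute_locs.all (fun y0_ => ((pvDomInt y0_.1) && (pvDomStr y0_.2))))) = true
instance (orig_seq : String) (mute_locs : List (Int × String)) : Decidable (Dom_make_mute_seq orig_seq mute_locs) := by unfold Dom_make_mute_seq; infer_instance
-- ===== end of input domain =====

-- B replaces A's per-index membership-test-and-append scan by a copy-once buffer patched at the dict's own keys; alternative decomposition, same cost.


-- ===== PORT A =====
-- for ind in range(len(orig_seq)): if ind in mute_locs: out += mute_locs[ind] else: out += orig_seq[ind]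
-- (the dict argument is represented as its association list; PySem.Dict.ofList rebuilds the dict)
def make_mute_seq (orig_seq : String) (mute_locs : List (Int × String)) : String :=
  let d : PySem.Dict Int String := PySem.Dict.ofList mute_locs
  (PySem.List.pyRange 0 (PySem.Str.len orig_seq) 1).foldl
    (fun mute_seq ind =>
      if d.contains ind then mute_seq ++ d.getD ind ""
      else mute_seq ++ String.ofList [(PySem.Str.pyGet? orig_seq ind).getD ' '])  -- index always in range: getD never hit
    ""

-- ===== PORT B =====
-- buf = list(orig_seq); for k, v in mute_locs.items(): if 0 <= k < len(buf): buf[k] = v; return ''.join(buf)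
def make_mute_seq_alt (orig_seq : String) (mute_locs : List (Int × String)) : String :=
  let d : PySem.Dict Int String := PySem.Dict.ofList mute_locs
  let buf0 : List String := orig_seq.toList.map (fun c => String.ofList [c])
  let buf := d.items.foldl
    (fun buf kv => if 0 ≤ kv.1 ∧ kv.1 < (buf.length : Int) then buf.set kv.1.toNat kv.2 else buf)
    buf0
  PySem.Str.join "" buf

-- ===== PRECONDITION & SPEC =====
def Spec_make_mute_seq (orig_seq : String) (mute_locs : List (Int × String)) (out : String) : Prop := out = make_mute_seq_alt orig_seq mute_locs
instance (orig_seq : String) (mute_locs : List (Int × String)) (out : String) : Decidable (Spec_make_mute_seq orig_seq mute_locs out) := by unfold Spec_make_mute_seq; infer_instance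

-- ===== CLAIM (what is proved, stated in full; the proofs are below) =====
def Claim_equal_make_mute_seq : Prop := ∀ (orig_seq : String) (mute_locs : List (Int × String)), Dom_make_mute_seq orig_seq mute_locs → Spec_make_mute_seq orig_seq mute_locs (make_mute_seq orig_seq mute_locs)

-- ===== LEMMAS AND PROOFS =====

-- A string-append fold flattens (the String counterpart of PySem.List.foldl_append_eq_flatMap).
theorem strfold_toList (l : List Int) (f : Int → String) (a : String) :
    (l.foldl (fun acc x => acc ++ f x) a).toList = a.toList ++ l.flatMap (fun x => (f x).toList) := by
  induction l generalizing a with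
  | nil => simp
  | cons h t ih => simp [ih, String.toList_append]

-- Element k of the patched buffer: the dict's value at k when present (and in range), else the original cell.
theorem patch_getElem? (ps : List (Int × String)) (hnd : (ps.map Prod.fst).Nodup)
    (buf : List String) (k : Nat) :
    (ps.foldl (fun buf kv => if 0 ≤ kv.1 ∧ kv.1 < (buf.length : Int) then buf.set kv.1.toNat kv.2 else buf) buf)[k]?
      = match (PySem.Dict.mk ps).get? (k : Int) with
        | some v => (buf.set k v)[k]?
        | none => buf[k]? := by
  induction ps generalizing buf with
  | nil => rfl
  | cons p t ih =>
    obtain ⟨a, v⟩ := p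
    simp only [List.map_cons, List.nodup_cons] at hnd
    simp only [List.foldl_cons, PySem.Dict.get?_mk_cons]
    by_cases hak : a = (k : Int)
    · subst hak
      have hnone : (PySem.Dict.mk t).get? (k : Int) = none := by
        rcases h : (PySem.Dict.mk t).get? (k : Int) with _ | w
        · rfl
        · have hmem : (k : Int) ∈ t.map Prod.fst := by
            simpa [PySem.Dict.keys] using
              PySem.Dict.mem_keys_of_mem_items _ (PySem.Dict.mem_items_of_get?_eq_some _ h)
          exact absurd hmem hnd.1
      rw [ih hnd.2]
      simp only [hnone]
      by_cases hk : k < buf.length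
      · have hcond : (0 ≤ (k : Int) ∧ (k : Int) < (buf.length : Int)) :=
          ⟨Int.natCast_nonneg k, by exact_mod_cast hk⟩
        simp [hk]
      · have hcond : ¬ (0 ≤ (k : Int) ∧ (k : Int) < (buf.length : Int)) := by omega
        rw [if_neg hcond]
        simp [hk]
    · have hne : (a == (k : Int)) = false := by simpa using hak
      rw [hne]
      simp only [Bool.false_eq_true, if_false]
      rw [ih hnd.2]
      by_cases hcond : 0 ≤ a ∧ a < (buf.length : Int)
      · rw [if_pos hcond]
        have hank : a.toNat ≠ k := fun h => hak (by omega)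
        rcases h : (PySem.Dict.mk t).get? (k : Int) with _ | w
        · simp [hank]
        · simp [List.getElem?_set]
      · rw [if_neg hcond]

-- ''.join(parts) is the flattening of the parts.
theorem join_empty_toList (parts : List String) :
    (PySem.Str.join "" parts).toList = parts.flatMap String.toList := by
  have h : ∀ ps : List (List Char), PySem.Chars.join [] ps = ps.flatten := by
    intro ps
    induction ps with
    | nil => rfl
    | cons h t ih =>
      cases t with
      | nil => simp [PySem.Chars.join, List.intercalate]
      | cons h2 t2 => simp_all [PySem.Chars.join, List.intercalate, List.intersperse]
  simp only [PySem.Str.toList_join, String.toList_empty, h, List.flatMap_def]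

theorem make_mute_seq_eq_alt (orig_seq : String) (mute_locs : List (Int × String)) :
    make_mute_seq orig_seq mute_locs = make_mute_seq_alt orig_seq mute_locs := by
  apply String.toList_injective
  simp only [make_mute_seq, make_mute_seq_alt]
  have hfun : (fun (mute_seq : String) (ind : Int) =>
      if (PySem.Dict.ofList (κ := Int) (ν := String) mute_locs).contains ind = true then
        mute_seq ++ (PySem.Dict.ofList (κ := Int) (ν := String) mute_locs).getD ind ""
      else mute_seq ++ String.ofList [(PySem.Str.pyGet? orig_seq ind).getD ' '])
      = (fun mute_seq ind => mute_seq ++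
          (if (PySem.Dict.ofList (κ := Int) (ν := String) mute_locs).contains ind = true then
            (PySem.Dict.ofList (κ := Int) (ν := String) mute_locs).getD ind ""
          else String.ofList [(PySem.Str.pyGet? orig_seq ind).getD ' '])) := by
    funext a i; split <;> rfl
  rw [hfun, strfold_toList, join_empty_toList]
  have hnd : ((PySem.Dict.ofList (κ := Int) (ν := String) mute_locs).items.map Prod.fst).Nodup := by
    simpa [PySem.Dict.keys] using PySem.Dict.nodup_keys_ofList (κ := Int) (ν := String) mute_locs
  simp only [String.toList_empty, List.nil_append]
  rw [PySem.Str.len_eq, PySem.List.pyRange_one]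
  have hlen0 : ((orig_seq.toList.length : Int) - 0).toNat = orig_seq.toList.length := by simp
  rw [hlen0, List.flatMap_map]
  -- the patched buffer, written as a map over the index range
  have hbuf : (PySem.Dict.ofList (κ := Int) (ν := String) mute_locs).items.foldl
      (fun buf kv => if 0 ≤ kv.1 ∧ kv.1 < (buf.length : Int) then buf.set kv.1.toNat kv.2 else buf)
      (orig_seq.toList.map (fun c => String.ofList [c]))
      = (List.range orig_seq.toList.length).map (fun (k : Nat) =>
          match (PySem.Dict.ofList (κ := Int) (ν := String) mute_locs).get? ((k : Nat) : Int) with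
          | some v => v
          | none => String.ofList [orig_seq.toList.getD k ' ']) := by
    apply List.ext_getElem?
    intro k
    rw [patch_getElem? _ hnd _ k]
    rcases h : (PySem.Dict.ofList (κ := Int) (ν := String) mute_locs).get? ((k : Nat) : Int) with _ | w
    · by_cases hk : k < orig_seq.toList.length
      · simp only [List.getElem?_map]
        rw [List.getElem?_range hk, List.getElem?_eq_getElem hk]
        simp [h, List.getD, List.getElem?_eq_getElem hk]
      · rw [List.getElem?_eq_none (by simpa using Nat.le_of_not_lt hk),
          List.getElem?_eq_none (by simpa using Nat.le_of_not_lt hk)]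
    · dsimp only
      by_cases hk : k < orig_seq.toList.length
      · rw [List.getElem?_set_self (by simpa using hk)]
        simp only [List.getElem?_map]
        rw [List.getElem?_range hk]
        simp [h]
      · rw [List.getElem?_eq_none (by simpa using Nat.le_of_not_lt hk)]
        exact (List.getElem?_eq_none (by simpa using Nat.le_of_not_lt hk)).symm
  rw [hbuf, List.flatMap_map]
  simp only [List.flatMap_def]
  apply congrArg List.flatten
  apply List.map_congr_left
  intro k hk
  have hk' : k < orig_seq.toList.length := List.mem_range.mp hk
  rcases h : (PySem.Dict.ofList (κ := Int) (ν := String) mute_locs).get? (k : Int) with _ | w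
  · have hc : (PySem.Dict.ofList (κ := Int) (ν := String) mute_locs).contains ((k : Nat) : Int) = false := by
      rw [PySem.Dict.contains_eq_isSome_get?]; simp [h]
    simp [hc, List.getD_eq_getElem?_getD, List.getElem?_eq_getElem hk']
  · have hc : (PySem.Dict.ofList (κ := Int) (ν := String) mute_locs).contains ((k : Nat) : Int) = true := by
      rw [PySem.Dict.contains_eq_isSome_get?]; simp [h]
    simp [hc, h, PySem.Dict.getD_eq_get?_getD]

-- ===== VERDICT (by name: the statement is the Claim_ definition above) =====
theorem make_mute_seq_spec : Claim_equal_make_mute_seq := by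
  intro orig_seq mute_locs _
  unfold Spec_make_mute_seq
  exact make_mute_seq_eq_alt orig_seq mute_locs
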